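-- pv_equiv track=rewrite | github.com/BradleySmall/advent | day_7/main.py | get_next_command
-- ===== SOURCE A (Python) =====
-- def get_opcode(opcode):
--     tmp = int(opcode)
--     op = tmp % 100
--     tmp //= 100
--     h = tmp % 10
--     tmp //= 10
--     k = tmp % 10
--     tmp //= 10
--     t = tmp % 10
--
--     if op in (1, 2, 7, 8):
--         t = 1
--     if op in (3,):
--         h = 1
--
--     return (h, k, t), op
--
-- def get_next_command(ip, codes):
--     parm_counts = {1: 3, 2: 3, 3: 1, 4: 1, 5: 2, 6: 2, 7: 3, 8: 3, 99: 0}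
--     modes, op = get_opcode(codes[ip])
--
--     params = [0, 0, 0]
--     ip += 1
--     for x in range(parm_counts[op]):
--         params[x] = codes[ip]
--         if modes[x] == 0:
--             params[x] = codes[params[x]]
--         ip += 1
--
--     return ip, op, params
-- ===== SOURCE B (Python) =====
-- def get_next_command(ip, codes):
--     n = int(codes[ip])
--     op = n % 100
--     cnt, has_dest = {1: (3, True), 2: (3, True), 3: (1, True), 4: (1, False),
--                      5: (2, False), 6: (2, False), 7: (3, True), 8: (3, True),
--                      99: (0, False)}[op]
--
--     def go(k, i, m):
--         # k parameters remaining, next raw parameter at codes[i], m holds the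
--         # still-unconsumed mode digits (least significant digit = current mode)
--         if k == 0:
--             return [0] * (3 - cnt)
--         v = codes[i]
--         immediate = m % 10 != 0 or (has_dest and k == 1)
--         return [v if immediate else codes[v]] + go(k - 1, i + 1, m // 10)
--
--     return ip + cnt + 1, op, go(cnt, ip + 1, n // 100)
-- ===== Notes on version B (the rewrite author's own statement) =====
-- stated objective: alternative
-- what changed: B replaces A's staged decode (peel all three mode digits into a tuple, override it, then an indexed loop mutating params[x] and ip) with a table of (count, has-destination) per opcode and a recursive helper that cons-builds the parameter list, threading the remaining mode digits as a single integer divided by 10 at each step and appending the zero padding at the base case.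
import Mathlib
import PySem

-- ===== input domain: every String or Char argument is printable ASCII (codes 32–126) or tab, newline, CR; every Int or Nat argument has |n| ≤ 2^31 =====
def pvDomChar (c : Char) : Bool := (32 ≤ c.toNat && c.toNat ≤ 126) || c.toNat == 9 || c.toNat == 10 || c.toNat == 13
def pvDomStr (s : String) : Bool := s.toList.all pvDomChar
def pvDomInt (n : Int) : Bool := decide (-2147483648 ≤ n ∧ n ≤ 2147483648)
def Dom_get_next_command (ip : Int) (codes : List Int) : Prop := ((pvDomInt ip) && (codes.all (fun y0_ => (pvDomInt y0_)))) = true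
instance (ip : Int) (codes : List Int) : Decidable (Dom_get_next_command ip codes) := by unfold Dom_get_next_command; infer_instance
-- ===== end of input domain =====

-- B replaces A's staged decode (mode tuple + override + indexed mutating loop) by a per-opcode
-- (count, has-destination) table and a recursion that cons-builds the parameter list while
-- threading the remaining mode digits as one integer divided by 10 each step.

-- ===== PORT A =====
def get_opcode (opcode : Int) : (Int × Int × Int) × Int :=
  let tmp := opcode
  let op := PySem.Int.mod tmp 100
  let tmp := PySem.Int.floordiv tmp 100
  let h := PySem.Int.mod tmp 10
  let tmp := PySem.Int.floordiv tmp 10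
  let k := PySem.Int.mod tmp 10
  let tmp := PySem.Int.floordiv tmp 10
  let t := PySem.Int.mod tmp 10
  let t := if op = 1 ∨ op = 2 ∨ op = 7 ∨ op = 8 then (1 : Int) else t
  let h := if op = 3 then (1 : Int) else h
  ((h, k, t), op)

-- modes[x] for the tuple of three modes (x is only ever 0, 1 or 2 in A's loop)
def pvTupleGet (m : Int × Int × Int) (x : Nat) : Int :=
  match x with
  | 0 => m.1
  | 1 => m.2.1
  | _ => m.2.2

def get_next_command (ip : Int) (codes : List Int) : Int × Int × List Int :=
  let parm_counts : PySem.Dict Int Int :=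
    PySem.Dict.ofList [(1, 3), (2, 3), (3, 1), (4, 1), (5, 2), (6, 2), (7, 3), (8, 3), (99, 0)]
  let mo := get_opcode (PySem.List.pyGetD codes ip 0)   -- codes[ip]: Pre_ keeps it in range
  let modes := mo.1
  let op := mo.2
  -- for x in range(parm_counts[op]): params[x] = …; ip += 1   (state = (ip, params))
  let st := (List.range (parm_counts.getD op 0).toNat).foldl
    (fun (s : Int × List Int) x =>
      let p := PySem.List.pyGetD codes s.1 0
      let p := if pvTupleGet modes x = 0 then PySem.List.pyGetD codes p 0 else p
      (s.1 + 1, s.2.set x p))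
    (ip + 1, [0, 0, 0])
  (st.1, op, st.2)

-- ===== PORT B =====
-- go(k, i, m) of Source B: k parameters remaining, next raw parameter at codes[i],
-- m holds the still-unconsumed mode digits (least significant digit = current mode)
def pvGo (codes : List Int) (cnt : Nat) (hasDest : Bool) : Nat → Int → Int → List Int
  | 0, _, _ => List.replicate (3 - cnt) 0
  | k + 1, i, m =>
    let v := PySem.List.pyGetD codes i 0
    let immediate := PySem.Int.mod m 10 != 0 || (hasDest && k + 1 == 1)
    (if immediate then v else PySem.List.pyGetD codes v 0) ::
      pvGo codes cnt hasDest k (i + 1) (PySem.Int.floordiv m 10)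

def get_next_command_alt (ip : Int) (codes : List Int) : Int × Int × List Int :=
  let n := PySem.List.pyGetD codes ip 0
  let op := PySem.Int.mod n 100
  let spec := (PySem.Dict.ofList
    [((1 : Int), ((3 : Int), true)), (2, (3, true)), (3, (1, true)), (4, (1, false)),
     (5, (2, false)), (6, (2, false)), (7, (3, true)), (8, (3, true)),
     (99, (0, false))]).getD op (0, false)
  (ip + spec.1 + 1, op,
    pvGo codes spec.1.toNat spec.2 spec.1.toNat (ip + 1) (PySem.Int.floordiv n 100))

-- ===== PRECONDITION & SPEC =====
-- number of parameters of each opcode (parm_counts of A)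
def pvCnt (op : Int) : Nat :=
  if op = 3 ∨ op = 4 then 1 else if op = 5 ∨ op = 6 then 2 else if op = 99 then 0 else 3

-- effective mode of parameter x (1 forced on the destination parameter of ops 1,2,3,7,8)
def pvMode (n op : Int) (x cnt : Nat) : Int :=
  if x + 1 = cnt ∧ (op = 1 ∨ op = 2 ∨ op = 3 ∨ op = 7 ∨ op = 8) then 1
  else PySem.Int.mod (PySem.Int.floordiv n (10 ^ (x + 2))) 10

-- Pre_ = exactly where the Python A returns: codes[ip] in range (else IndexError), the opcode
-- a parm_counts key (else KeyError), each raw parameter in range and, when its effective mode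
-- is 0 (position mode), its dereference in range too (else IndexError).
def Pre_get_next_command (ip : Int) (codes : List Int) : Prop :=
  PySem.Raise.InRange codes.length ip ∧
  (PySem.Int.mod (PySem.List.pyGetD codes ip 0) 100 = 1 ∨
   PySem.Int.mod (PySem.List.pyGetD codes ip 0) 100 = 2 ∨
   PySem.Int.mod (PySem.List.pyGetD codes ip 0) 100 = 3 ∨
   PySem.Int.mod (PySem.List.pyGetD codes ip 0) 100 = 4 ∨
   PySem.Int.mod (PySem.List.pyGetD codes ip 0) 100 = 5 ∨
   PySem.Int.mod (PySem.List.pyGetD codes ip 0) 100 = 6 ∨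
   PySem.Int.mod (PySem.List.pyGetD codes ip 0) 100 = 7 ∨
   PySem.Int.mod (PySem.List.pyGetD codes ip 0) 100 = 8 ∨
   PySem.Int.mod (PySem.List.pyGetD codes ip 0) 100 = 99) ∧
  ∀ x < pvCnt (PySem.Int.mod (PySem.List.pyGetD codes ip 0) 100),
    PySem.Raise.InRange codes.length (ip + 1 + (x : Int)) ∧
    (pvMode (PySem.List.pyGetD codes ip 0) (PySem.Int.mod (PySem.List.pyGetD codes ip 0) 100)
        x (pvCnt (PySem.Int.mod (PySem.List.pyGetD codes ip 0) 100)) = 0 →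
      PySem.Raise.InRange codes.length (PySem.List.pyGetD codes (ip + 1 + (x : Int)) 0))

instance (ip : Int) (codes : List Int) : Decidable (Pre_get_next_command ip codes) := by
  unfold Pre_get_next_command; infer_instance

def pvWitness_get_next_command : Int × List Int := (0, [1002, 4, 3, 4, 33])

def Spec_get_next_command (ip : Int) (codes : List Int) (out : Int × Int × List Int) : Prop :=
  out = get_next_command_alt ip codes
instance (ip : Int) (codes : List Int) (out : Int × Int × List Int) :
    Decidable (Spec_get_next_command ip codes out) := by unfold Spec_get_next_command; infer_instance

-- ===== CLAIM (what is proved, stated in full; the proofs are below) =====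
def Claim_equal_get_next_command : Prop := ∀ (ip : Int) (codes : List Int),
  Dom_get_next_command ip codes → Pre_get_next_command ip codes →
  Spec_get_next_command ip codes (get_next_command ip codes)

-- ===== LEMMAS AND PROOFS =====
lemma pv_fdiv_fdiv (n a b : Int) (ha : 0 < a) (hb : 0 < b) :
    PySem.Int.floordiv (PySem.Int.floordiv n a) b = PySem.Int.floordiv n (a * b) := by
  rw [PySem.Int.floordiv_eq_ediv_of_pos ha, PySem.Int.floordiv_eq_ediv_of_pos hb,
    PySem.Int.floordiv_eq_ediv_of_pos (by positivity)]
  exact Int.ediv_ediv_of_nonneg (le_of_lt ha)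

-- the second and third mode digits, written as A extracts them and as B extracts them
lemma pv_dig1 (n : Int) : PySem.Int.mod (PySem.Int.floordiv (PySem.Int.floordiv n 100) 10) 10
    = PySem.Int.mod (PySem.Int.floordiv n 1000) 10 := by
  rw [pv_fdiv_fdiv _ _ _ (by norm_num) (by norm_num)]; norm_num
lemma pv_dig2 (n : Int) :
    PySem.Int.mod (PySem.Int.floordiv (PySem.Int.floordiv (PySem.Int.floordiv n 100) 10) 10) 10
    = PySem.Int.mod (PySem.Int.floordiv n 10000) 10 := by
  rw [pv_fdiv_fdiv _ _ _ (by norm_num) (by norm_num),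
    pv_fdiv_fdiv _ _ _ (by norm_num) (by norm_num)]; norm_num

-- the same two digits after simp has turned floordiv/mod (positive divisors) into / and %
lemma pv_e1 (n : Int) : n / 100 / 10 = n / 1000 := by
  rw [Int.ediv_ediv_of_nonneg (by norm_num)]; norm_num
lemma pv_e2 (n : Int) : n / 1000 / 10 = n / 10000 := by
  rw [Int.ediv_ediv_of_nonneg (by norm_num)]; norm_num

-- unfolding lemmas for B's recursive helper
lemma pvGo_zero (codes : List Int) (cnt : Nat) (d : Bool) (i m : Int) :
    pvGo codes cnt d 0 i m = List.replicate (3 - cnt) 0 := rfl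
lemma pvGo_succ (codes : List Int) (cnt k : Nat) (d : Bool) (i m : Int) :
    pvGo codes cnt d (k + 1) i m =
    (if PySem.Int.mod m 10 != 0 || (d && k + 1 == 1)
      then PySem.List.pyGetD codes i 0
      else PySem.List.pyGetD codes (PySem.List.pyGetD codes i 0) 0) ::
      pvGo codes cnt d k (i + 1) (PySem.Int.floordiv m 10) := rfl

lemma pv_cnt_1 : (PySem.Dict.ofList
    [((1:Int), (3:Int)), (2, 3), (3, 1), (4, 1), (5, 2), (6, 2), (7, 3), (8, 3), (99, 0)]).getD 1 0 = 3 := by decide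
lemma pv_cnt_2 : (PySem.Dict.ofList
    [((1:Int), (3:Int)), (2, 3), (3, 1), (4, 1), (5, 2), (6, 2), (7, 3), (8, 3), (99, 0)]).getD 2 0 = 3 := by decide
lemma pv_cnt_3 : (PySem.Dict.ofList
    [((1:Int), (3:Int)), (2, 3), (3, 1), (4, 1), (5, 2), (6, 2), (7, 3), (8, 3), (99, 0)]).getD 3 0 = 1 := by decide
lemma pv_cnt_4 : (PySem.Dict.ofList
    [((1:Int), (3:Int)), (2, 3), (3, 1), (4, 1), (5, 2), (6, 2), (7, 3), (8, 3), (99, 0)]).getD 4 0 = 1 := by decide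
lemma pv_cnt_5 : (PySem.Dict.ofList
    [((1:Int), (3:Int)), (2, 3), (3, 1), (4, 1), (5, 2), (6, 2), (7, 3), (8, 3), (99, 0)]).getD 5 0 = 2 := by decide
lemma pv_cnt_6 : (PySem.Dict.ofList
    [((1:Int), (3:Int)), (2, 3), (3, 1), (4, 1), (5, 2), (6, 2), (7, 3), (8, 3), (99, 0)]).getD 6 0 = 2 := by decide
lemma pv_cnt_7 : (PySem.Dict.ofList
    [((1:Int), (3:Int)), (2, 3), (3, 1), (4, 1), (5, 2), (6, 2), (7, 3), (8, 3), (99, 0)]).getD 7 0 = 3 := by decide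
lemma pv_cnt_8 : (PySem.Dict.ofList
    [((1:Int), (3:Int)), (2, 3), (3, 1), (4, 1), (5, 2), (6, 2), (7, 3), (8, 3), (99, 0)]).getD 8 0 = 3 := by decide
lemma pv_cnt_99 : (PySem.Dict.ofList
    [((1:Int), (3:Int)), (2, 3), (3, 1), (4, 1), (5, 2), (6, 2), (7, 3), (8, 3), (99, 0)]).getD 99 0 = 0 := by decide
lemma pv_spec_1 : (PySem.Dict.ofList
    [((1 : Int), ((3 : Int), true)), (2, (3, true)), (3, (1, true)), (4, (1, false)),
     (5, (2, false)), (6, (2, false)), (7, (3, true)), (8, (3, true)),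
     (99, (0, false))]).getD 1 ((0 : Int), false) = (3, true) := by decide
lemma pv_spec_2 : (PySem.Dict.ofList
    [((1 : Int), ((3 : Int), true)), (2, (3, true)), (3, (1, true)), (4, (1, false)),
     (5, (2, false)), (6, (2, false)), (7, (3, true)), (8, (3, true)),
     (99, (0, false))]).getD 2 ((0 : Int), false) = (3, true) := by decide
lemma pv_spec_3 : (PySem.Dict.ofList
    [((1 : Int), ((3 : Int), true)), (2, (3, true)), (3, (1, true)), (4, (1, false)),
     (5, (2, false)), (6, (2, false)), (7, (3, true)), (8, (3, true)),
     (99, (0, false))]).getD 3 ((0 : Int), false) = (1, true) := by decide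
lemma pv_spec_4 : (PySem.Dict.ofList
    [((1 : Int), ((3 : Int), true)), (2, (3, true)), (3, (1, true)), (4, (1, false)),
     (5, (2, false)), (6, (2, false)), (7, (3, true)), (8, (3, true)),
     (99, (0, false))]).getD 4 ((0 : Int), false) = (1, false) := by decide
lemma pv_spec_5 : (PySem.Dict.ofList
    [((1 : Int), ((3 : Int), true)), (2, (3, true)), (3, (1, true)), (4, (1, false)),
     (5, (2, false)), (6, (2, false)), (7, (3, true)), (8, (3, true)),
     (99, (0, false))]).getD 5 ((0 : Int), false) = (2, false) := by decide
lemma pv_spec_6 : (PySem.Dict.ofList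
    [((1 : Int), ((3 : Int), true)), (2, (3, true)), (3, (1, true)), (4, (1, false)),
     (5, (2, false)), (6, (2, false)), (7, (3, true)), (8, (3, true)),
     (99, (0, false))]).getD 6 ((0 : Int), false) = (2, false) := by decide
lemma pv_spec_7 : (PySem.Dict.ofList
    [((1 : Int), ((3 : Int), true)), (2, (3, true)), (3, (1, true)), (4, (1, false)),
     (5, (2, false)), (6, (2, false)), (7, (3, true)), (8, (3, true)),
     (99, (0, false))]).getD 7 ((0 : Int), false) = (3, true) := by decide
lemma pv_spec_8 : (PySem.Dict.ofList
    [((1 : Int), ((3 : Int), true)), (2, (3, true)), (3, (1, true)), (4, (1, false)),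
     (5, (2, false)), (6, (2, false)), (7, (3, true)), (8, (3, true)),
     (99, (0, false))]).getD 8 ((0 : Int), false) = (3, true) := by decide
lemma pv_spec_99 : (PySem.Dict.ofList
    [((1 : Int), ((3 : Int), true)), (2, (3, true)), (3, (1, true)), (4, (1, false)),
     (5, (2, false)), (6, (2, false)), (7, (3, true)), (8, (3, true)),
     (99, (0, false))]).getD 99 ((0 : Int), false) = (0, false) := by decide

-- ===== VERDICT (by name: the statement is the Claim_ definition above) =====
theorem get_next_command_spec : Claim_equal_get_next_command := by
  intro ip codes _ hpre
  unfold Spec_get_next_command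
  obtain ⟨-, hop, -⟩ := hpre
  unfold get_next_command get_next_command_alt get_opcode
  rcases hop with h | h | h | h | h | h | h | h | h <;>
    simp only [h, pv_cnt_1, pv_cnt_2, pv_cnt_3, pv_cnt_4, pv_cnt_5, pv_cnt_6, pv_cnt_7,
      pv_cnt_8, pv_cnt_99, pv_spec_1, pv_spec_2, pv_spec_3, pv_spec_4, pv_spec_5, pv_spec_6,
      pv_spec_7, pv_spec_8, pv_spec_99, show Int.toNat 3 = 3 from rfl,
      show Int.toNat 2 = 2 from rfl, show Int.toNat 1 = 1 from rfl,
      show Int.toNat 0 = 0 from rfl] <;>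
    norm_num [List.range_succ, pvTupleGet, pvGo_succ, pvGo_zero,
      show ((3:Nat)) = 2 + 1 from rfl, show ((2:Nat)) = 1 + 1 from rfl,
      pv_dig1, pv_dig2, pv_e1, pv_e2, List.replicate] <;> ring_nf
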